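-- pv_equiv track=rewrite | github.com/haolunc/ARC-RL | reference_solutions/solutions/a79310a0.py | transform
-- ===== SOURCE A (Python) =====
-- def transform(grid):
--     n = len(grid)
--     m = len(grid[0]) if n > 0 else 0
--     out = [[0 for _ in range(m)] for _ in range(n)]
--     for r in range(n):
--         for c in range(m):
--             if grid[r][c] == 8:
--                 if r + 1 < n:
--                     out[r + 1][c] = 2
--     return out
-- ===== SOURCE B (Python) =====
-- def transform(grid):
--     n = len(grid)
--     m = len(grid[0]) if n > 0 else 0
--     cols = [[grid[r][c] for r in range(n)] for c in range(m)]
--     shifted = [[0] + [2 if v == 8 else 0 for v in col[:-1]] for col in cols]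
--     return [[shifted[c][r] for c in range(m)] for r in range(n)]
-- ===== Notes on version B (the rewrite author's own statement) =====
-- stated objective: alternative
-- what changed: B works column-wise: it transposes the grid into columns, shifts each column down by one (prepend 0, map 8->2 over all but the last cell), and transposes back, instead of A's row scan that scatters a 2 one row below each 8 into a prebuilt zero matrix.
import Mathlib
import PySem

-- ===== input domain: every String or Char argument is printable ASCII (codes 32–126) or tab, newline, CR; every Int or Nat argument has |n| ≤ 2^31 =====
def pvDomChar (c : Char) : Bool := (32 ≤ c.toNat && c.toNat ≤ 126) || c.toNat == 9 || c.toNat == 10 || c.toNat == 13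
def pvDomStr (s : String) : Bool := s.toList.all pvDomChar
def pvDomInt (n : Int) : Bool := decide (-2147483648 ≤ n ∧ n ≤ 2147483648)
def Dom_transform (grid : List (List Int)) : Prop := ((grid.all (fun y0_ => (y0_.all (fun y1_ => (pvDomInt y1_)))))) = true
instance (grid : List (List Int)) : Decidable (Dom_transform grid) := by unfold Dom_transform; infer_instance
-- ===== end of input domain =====

-- B is column-wise: transpose, shift each column down one (prepend 0, 8->2 on all but the
-- last cell), transpose back — instead of A's row scan scattering 2s into a zero matrix.
-- Alternative decomposition, no speed claim.

-- ===== PORT A =====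
def transform (grid : List (List Int)) : List (List Int) :=
  let n := grid.length
  let m := if 0 < n then (grid.getD 0 []).length else 0
  let out := List.replicate n (List.replicate m (0 : Int))
  (List.range n).foldl (fun out r =>
    (List.range m).foldl (fun out c =>
      if (grid.getD r []).getD c 0 == 8 then
        if r + 1 < n then out.set (r + 1) ((out.getD (r + 1) []).set c 2) else out
      else out) out) out

-- ===== PORT B =====
-- col[:-1] is List.dropLast (exact for Python's [:-1] on a list).
def transform_alt (grid : List (List Int)) : List (List Int) :=
  let n := grid.length
  let m := if 0 < n then (grid.getD 0 []).length else 0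
  let cols := (List.range m).map (fun c => (List.range n).map (fun r => (grid.getD r []).getD c 0))
  let shifted := cols.map (fun col =>
    (0 : Int) :: col.dropLast.map (fun v => if v == 8 then (2 : Int) else 0))
  (List.range n).map (fun r => (List.range m).map (fun c => (shifted.getD c []).getD r 0))

-- ===== PRECONDITION & SPEC =====
-- Pre_ excludes exactly the ragged grids on which the Python A raises IndexError
-- (some row shorter than row 0, so grid[r][c] fails for some c < len(grid[0])); B raises there too.
def Pre_transform (grid : List (List Int)) : Prop :=
  ∀ row ∈ grid, (grid.getD 0 []).length ≤ row.length
instance (grid : List (List Int)) : Decidable (Pre_transform grid) := by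
  unfold Pre_transform; infer_instance
def pvWitness_transform : List (List Int) := [[8, 0], [0, 0]]

def Spec_transform (grid : List (List Int)) (out : List (List Int)) : Prop := out = transform_alt grid
instance (grid : List (List Int)) (out : List (List Int)) : Decidable (Spec_transform grid out) := by unfold Spec_transform; infer_instance

-- ===== CLAIM (what is proved, stated in full; the proofs are below) =====
def Claim_equal_transform : Prop := ∀ (grid : List (List Int)), Dom_transform grid → Pre_transform grid → Spec_transform grid (transform grid)

-- ===== LEMMAS AND PROOFS =====

-- proof-only abbreviation: the shifted row built from input row r
def pvRow (grid : List (List Int)) (m r : Nat) : List Int :=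
  (List.range m).map (fun c => if (grid.getD r []).getD c 0 == 8 then (2 : Int) else 0)

-- proof-only normal form both ports are reduced to
def pvGather (grid : List (List Int)) : List (List Int) :=
  if grid = [] then []
  else List.replicate (grid.getD 0 []).length 0 ::
    (List.range (grid.length - 1)).map (pvRow grid (grid.getD 0 []).length)

theorem pv_getD_map_range {α : Type} (g : Nat → α) (l k : Nat) (d : α) (h : k < l) :
    ((List.range l).map g).getD k d = g k := by
  simp [List.getD, h]

-- A's inner loop only rewrites row r+1 of out
theorem pv_inner_lift (grid : List (List Int)) (r : Nat) (j : Nat) :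
    ∀ (out : List (List Int)), r + 1 < out.length →
    (List.range j).foldl (fun out c =>
      if (grid.getD r []).getD c 0 == 8 then
        out.set (r + 1) ((out.getD (r + 1) []).set c 2) else out) out
      = out.set (r + 1)
          ((List.range j).foldl (fun t c =>
            if (grid.getD r []).getD c 0 == 8 then t.set c 2 else t) (out.getD (r + 1) [])) := by
  induction j with
  | zero =>
    intro out h
    simp [List.getD, List.getElem?_eq_getElem h]
  | succ j ih =>
    intro out h
    rw [List.range_succ, List.foldl_append, List.foldl_append, ih out h]
    simp only [List.foldl_cons, List.foldl_nil]
    by_cases hp : (grid.getD r []).getD j 0 == 8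
    · rw [if_pos hp, if_pos hp, List.set_set]
      congr 1
      congr 1
      simp [List.getD, h]
    · rw [if_neg hp, if_neg hp]

-- the per-row fold starting from a zero row builds the shifted row
theorem pv_zero_fold (grid : List (List Int)) (r m : Nat) (j : Nat) (hj : j ≤ m) :
    (List.range j).foldl (fun t c =>
        if (grid.getD r []).getD c 0 == 8 then t.set c 2 else t) (List.replicate m (0 : Int))
      = ((List.range j).map (fun c => if (grid.getD r []).getD c 0 == 8 then (2 : Int) else 0))
          ++ List.replicate (m - j) 0 := by
  induction j with
  | zero => simp
  | succ j ih =>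
    have hj' : j ≤ m := Nat.le_of_succ_le hj
    rw [List.range_succ, List.foldl_append, List.map_append, ih hj']
    simp only [List.foldl_cons, List.foldl_nil, List.map_cons, List.map_nil]
    have hrep : List.replicate (m - j) (0 : Int) = 0 :: List.replicate (m - (j+1)) 0 := by
      have : m - j = (m - (j+1)) + 1 := by omega
      rw [this, List.replicate_succ]
    by_cases hp : (grid.getD r []).getD j 0 == 8
    · rw [if_pos hp, if_pos hp]
      rw [hrep, List.set_append_right _ _ (by simp), List.append_assoc]
      simp
    · rw [if_neg hp, if_neg hp, hrep]
      simp

-- a fold whose step never changes the accumulator is the identity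
theorem pv_foldl_id {α β : Type} (f : α → β → α) (h : ∀ a b, f a b = a) :
    ∀ (l : List β) (a : α), l.foldl f a = a := by
  intro l; induction l with
  | nil => intro a; rfl
  | cons x xs ih => intro a; simp [List.foldl, h, ih]

-- invariant of A's outer loop: after k rows, rows 1..k carry the shifted rows, the rest zeros
theorem pv_outer (grid : List (List Int)) (n m : Nat) (hn : n = grid.length)
    (hg : 0 < n) (k : Nat) (hk : k ≤ n - 1) :
    (List.range k).foldl (fun out r =>
      (List.range m).foldl (fun out c =>
        if (grid.getD r []).getD c 0 == 8 then
          if r + 1 < n then out.set (r + 1) ((out.getD (r + 1) []).set c 2) else out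
        else out) out) (List.replicate n (List.replicate m (0 : Int)))
    = List.replicate m 0 :: ((List.range k).map (pvRow grid m)
        ++ List.replicate (n - 1 - k) (List.replicate m 0)) := by
  induction k with
  | zero =>
    simp only [List.range_zero, List.foldl_nil, List.map_nil, List.nil_append]
    have h1 : n = (n - 1) + 1 := by omega
    conv_lhs => rw [h1, List.replicate_succ]
    simp
  | succ k ih =>
    have hk' : k ≤ n - 1 := Nat.le_of_succ_le hk
    rw [List.range_succ, List.foldl_append, ih hk']
    simp only [List.foldl_cons, List.foldl_nil]
    have hkn : k + 1 < n := by omega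
    have hfun : (fun (out : List (List Int)) (c : Nat) =>
        if (grid.getD k []).getD c 0 == 8 then
          if k + 1 < n then out.set (k + 1) ((out.getD (k + 1) []).set c 2) else out
        else out)
      = (fun out c => if (grid.getD k []).getD c 0 == 8 then
          out.set (k + 1) ((out.getD (k + 1) []).set c 2) else out) := by
      funext out c
      by_cases hp : (grid.getD k []).getD c 0 == 8 <;> simp [hkn]
    rw [hfun]
    set S := List.replicate m (0:Int) :: ((List.range k).map (pvRow grid m)
        ++ List.replicate (n - 1 - k) (List.replicate m 0)) with hS
    have hlen : S.length = n := by simp [hS]; omega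
    rw [pv_inner_lift grid k m S (by omega)]
    have hget : S.getD (k + 1) [] = List.replicate m 0 := by
      have h1 : n - 1 - k = (n - 1 - (k+1)) + 1 := by omega
      rw [hS, h1, List.replicate_succ]
      simp [List.getD]
    rw [hget, pv_zero_fold grid k m m le_rfl]
    simp only [Nat.sub_self, List.replicate_zero, List.append_nil]
    have h1 : n - 1 - k = (n - 1 - (k+1)) + 1 := by omega
    rw [hS, h1, List.replicate_succ, List.map_append]
    simp only [List.set_cons_succ]
    rw [List.set_append_right _ _ (by simp)]
    simp [pvRow]

-- A reduces to the normal form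
theorem pv_A_gather (grid : List (List Int)) : transform grid = pvGather grid := by
  by_cases hg : grid = []
  · subst hg; rfl
  · have hn : 0 < grid.length := List.length_pos_iff.mpr hg
    unfold transform pvGather
    rw [if_neg hg]
    simp only [if_pos hn]
    set n := grid.length with hdefn
    set m := (grid.getD 0 []).length with hdefm
    have hrange : List.range n = List.range (n-1) ++ [n-1] := by
      rw [← List.range_succ]; congr 1; omega
    rw [hrange, List.foldl_append, pv_outer grid n m rfl hn (n-1) le_rfl]
    simp only [Nat.sub_self, List.replicate_zero, List.append_nil, List.foldl_cons, List.foldl_nil]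
    rw [pv_foldl_id _ (by
      intro a b
      by_cases hp : (grid.getD (n-1) []).getD b 0 == 8
      · rw [if_pos hp, if_neg (by omega)]
      · rw [if_neg hp])]

-- B reduces to the normal form
theorem pv_B_gather (grid : List (List Int)) : transform_alt grid = pvGather grid := by
  by_cases hg : grid = []
  · subst hg; rfl
  · have hn : 0 < grid.length := List.length_pos_iff.mpr hg
    unfold transform_alt pvGather
    rw [if_neg hg]
    simp only [if_pos hn]
    set n := grid.length with hdefn
    set m := (grid.getD 0 []).length with hdefm
    -- the shifted column for c < m, read at row r
    have hcol : ∀ c < m, ∀ r < n,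
        ((((List.range m).map (fun c => (List.range n).map (fun r => (grid.getD r []).getD c 0))).map
          (fun col => (0 : Int) :: col.dropLast.map (fun v => if v == 8 then (2:Int) else 0))).getD c []).getD r 0
        = if r = 0 then 0 else if (grid.getD (r-1) []).getD c 0 == 8 then 2 else 0 := by
      intro c hc r hr
      rw [List.map_map, pv_getD_map_range _ m c [] hc]
      simp only [Function.comp]
      have hdrop : ((List.range n).map (fun r => (grid.getD r []).getD c 0)).dropLast
          = (List.range (n-1)).map (fun r => (grid.getD r []).getD c 0) := by
        rw [← List.map_dropLast]
        congr 1
        rw [List.dropLast_eq_take]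
        simp [List.take_range]
      rw [hdrop, List.map_map]
      cases r with
      | zero => simp
      | succ r =>
        simp only [List.getD_cons_succ]
        rw [pv_getD_map_range _ (n-1) r 0 (by omega)]
        simp [Function.comp]
    -- replace each entry by its closed form, then split off row 0
    have hmap : (List.range n).map (fun r => (List.range m).map (fun c =>
        ((((List.range m).map (fun c => (List.range n).map (fun r => (grid.getD r []).getD c 0))).map
          (fun col => (0 : Int) :: col.dropLast.map (fun v => if v == 8 then (2:Int) else 0))).getD c []).getD r 0))
        = (List.range n).map (fun r => (List.range m).map (fun c =>
            if r = 0 then (0:Int) else if (grid.getD (r-1) []).getD c 0 == 8 then 2 else 0)) := by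
      apply List.map_congr_left
      intro r hr
      simp only [List.mem_range] at hr
      apply List.map_congr_left
      intro c hc
      simp only [List.mem_range] at hc
      exact hcol c hc r hr
    rw [hmap]
    have hrange : List.range n = 0 :: (List.range (n-1)).map Nat.succ := by
      have h1 : n = (n-1) + 1 := by omega
      conv_lhs => rw [h1]
      rw [List.range_succ_eq_map]
    rw [hrange]
    simp only [List.map_cons, List.map_map]
    refine congrArg₂ List.cons ?_ ?_
    · simp
    · apply List.map_congr_left
      intro k hk
      simp [pvRow, Function.comp]

-- ===== VERDICT (by name: the statement is the Claim_ definition above) =====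
theorem transform_spec : Claim_equal_transform := by
  intro grid _ _
  unfold Spec_transform
  rw [pv_A_gather, pv_B_gather]
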